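-- pv_equiv track=rewrite | github.com/isabert/programming_questions_binarysearch.com | Q387_Rookie_Mistake.py | solve
-- ===== SOURCE A (Python) =====
-- def solve(s):
--     ind = 0
--     for i in range(len(s)):
--         if(s[i]=="R"):
--             ind=i
--             break
--
--     l = True
--     r = True
--     for i in range(ind):
--         if(s[i]=='B'):
--             l=False
--             break
--
--     for i in range(ind+1, len(s)):
--         if(s[i]=="B"):
--             r = False
--             break
--
--     return l or r
-- ===== SOURCE B (Python) =====
-- def solve(s):
--     found_r = False
--     bishop_left = False
--     bishop_right = False
--     for c in s:
--         if c == 'R' and not found_r: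
--             found_r = True
--         elif c == 'B':
--             if found_r:
--                 bishop_right = True
--             else:
--                 bishop_left = True
--     return (not bishop_left) or (not bishop_right)
-- ===== Notes on version B (the rewrite author's own statement) =====
-- stated objective: simpler
-- what changed: Replaced find-first-R followed by two bounded index scans with a single stateful left-to-right pass tracking whether an R was seen and whether a bishop appeared before/after it (one direct iteration over the characters instead of range/index lookups).
import Mathlib
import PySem

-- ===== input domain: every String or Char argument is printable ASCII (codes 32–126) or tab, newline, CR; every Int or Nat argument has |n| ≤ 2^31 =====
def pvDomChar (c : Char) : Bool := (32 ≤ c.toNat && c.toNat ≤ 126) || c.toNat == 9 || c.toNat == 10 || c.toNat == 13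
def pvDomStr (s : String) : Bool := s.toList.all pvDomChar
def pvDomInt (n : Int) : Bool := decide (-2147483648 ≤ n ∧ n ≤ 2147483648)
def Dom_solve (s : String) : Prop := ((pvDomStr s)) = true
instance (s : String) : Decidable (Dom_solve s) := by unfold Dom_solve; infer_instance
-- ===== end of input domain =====

-- B replaces A's find-first-R plus two bounded scans by one stateful pass; objective: simpler.

-- ===== PORT A =====
-- first loop: ind = 0; scan for the first 'R', recording its index and breaking
def solveFindR (l : List Char) (i : Nat) : Nat :=
  match l with
  | [] => 0
  | c :: rest => if c == 'R' then i else solveFindR rest (i + 1)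

-- the second/third loops: scan a segment, break (result false) at the first 'B'
def scanNoB (l : List Char) : Bool :=
  match l with
  | [] => true
  | c :: rest => if c == 'B' then false else scanNoB rest

def solve (s : String) : Bool :=
  scanNoB (s.toList.take (solveFindR s.toList 0)) ||
    scanNoB (s.toList.drop (solveFindR s.toList 0 + 1))

-- ===== PORT B =====
def solveAltLoop (l : List Char) (foundR bl br : Bool) : Bool :=
  match l with
  | [] => (!bl) || (!br)
  | c :: rest =>
    if c == 'R' && !foundR then solveAltLoop rest true bl br
    else if c == 'B' then
      if foundR then solveAltLoop rest foundR bl true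
      else solveAltLoop rest foundR true br
    else solveAltLoop rest foundR bl br

def solve_alt (s : String) : Bool :=
  solveAltLoop s.toList false false false

-- ===== PRECONDITION & SPEC =====
def Spec_solve (s : String) (out : Bool) : Prop := out = solve_alt s
instance (s : String) (out : Bool) : Decidable (Spec_solve s out) := by unfold Spec_solve; infer_instance

-- ===== CLAIM (what is proved, stated in full; the proofs are below) =====
def Claim_equal_solve : Prop := ∀ (s : String), Dom_solve s → Spec_solve s (solve s)

-- ===== LEMMAS AND PROOFS =====

-- index of the first 'R', length of the list if there is none
def firstR (l : List Char) : Nat :=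
  match l with
  | [] => 0
  | c :: rest => if c == 'R' then 0 else firstR rest + 1

lemma solveFindR_mem (l : List Char) (h : 'R' ∈ l) : ∀ i, solveFindR l i = i + firstR l := by
  induction l with
  | nil => cases h
  | cons c rest ih =>
    intro i
    by_cases hc : c = 'R'
    · simp [solveFindR, firstR, hc]
    · have hr : 'R' ∈ rest := by
        rcases List.mem_cons.mp h with h1 | h1
        · exact absurd h1.symm hc
        · exact h1
      simp [solveFindR, firstR, hc, ih hr]
      omega

lemma firstR_not_mem (l : List Char) (h : 'R' ∉ l) : firstR l = l.length := by
  induction l with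
  | nil => rfl
  | cons c rest ih =>
    have hc : c ≠ 'R' := fun e => h (e ▸ List.mem_cons_self)
    simp [firstR, hc, ih (fun m => h (List.mem_cons_of_mem _ m))]

lemma solveFindR_not_mem (l : List Char) (h : 'R' ∉ l) : ∀ i, solveFindR l i = 0 := by
  induction l with
  | nil => intro i; rfl
  | cons c rest ih =>
    intro i
    have hc : c ≠ 'R' := fun e => h (e ▸ List.mem_cons_self)
    simp [solveFindR, hc, ih (fun m => h (List.mem_cons_of_mem _ m))]

lemma altLoop_found (l : List Char) : ∀ bl br,
    solveAltLoop l true bl br = (!bl || (!br && scanNoB l)) := by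
  induction l with
  | nil => intro bl br; cases bl <;> cases br <;> simp [solveAltLoop, scanNoB]
  | cons c rest ih =>
    intro bl br
    by_cases hc : c = 'B'
    · simp [solveAltLoop, hc, scanNoB, ih]
    · simp [solveAltLoop, hc, scanNoB, ih]

lemma altLoop_key (l : List Char) : ∀ bl,
    solveAltLoop l false bl false =
      ((!bl && scanNoB (l.take (firstR l))) || scanNoB (l.drop (firstR l + 1))) := by
  induction l with
  | nil => intro bl; cases bl <;> simp [solveAltLoop, scanNoB, firstR]
  | cons c rest ih =>
    intro bl
    by_cases hR : c = 'R'
    · simp [solveAltLoop, hR, firstR, scanNoB, altLoop_found]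
    · by_cases hB : c = 'B'
      · simp [solveAltLoop, hR, hB, firstR, scanNoB, ih true]
      · simp [solveAltLoop, hR, hB, firstR, scanNoB, ih bl]

-- ===== VERDICT (by name: the statement is the Claim_ definition above) =====
theorem solve_spec : Claim_equal_solve := by
  intro s _
  unfold Spec_solve solve solve_alt
  by_cases h : 'R' ∈ s.toList
  · rw [solveFindR_mem _ h 0, altLoop_key]
    simp
  · rw [solveFindR_not_mem _ h 0, altLoop_key]
    have hlen : firstR s.toList = s.toList.length := firstR_not_mem _ h
    have hdrop : (s.toList.drop (firstR s.toList + 1)) = [] :=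
      List.drop_eq_nil_of_le (by omega)
    simp [hdrop, scanNoB]
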